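-- pv_equiv track=rewrite | github.com/tenacioustommy/Leetcode | 数组/数组操作.py | min_operations_to_exceed
-- ===== SOURCE A (Python) =====
-- def min_operations_to_exceed(x, y, a):
--     operations = 0
--     a.sort(reverse=True)  # Sort the array in descending order to maximize the multiplication effect
--
--     while x < y:
--         if not a:
--             return -1  # If the array is empty and x is still less than y, return -1
--
--         max_element = a[0]
--         x *= max_element
--         a = [elem for elem in a if elem != max_element]  # Remove all occurrences of max_element from the array
--         operations += 1
--
--     return operations
-- ===== SOURCE B (Python) =====
-- def min_operations_to_exceed(x, y, a):
--     # Same return value as A (A also sorts `a` in place; B does not mutate `a`).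
--     ops = 0
--     for v in sorted(set(a), reverse=True):
--         if x >= y:
--             return ops
--         x *= v
--         ops += 1
--     return ops if x >= y else -1
-- ===== Notes on version B (the rewrite author's own statement) =====
-- stated objective: alternative
-- what changed: Instead of repeatedly taking the head of a sorted list and rebuilding the whole list with a filter pass on every iteration, B builds the distinct multipliers once via set+sort and makes a single pass over them; B also does not mutate the argument list (A sorts it in place).
import Mathlib
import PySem

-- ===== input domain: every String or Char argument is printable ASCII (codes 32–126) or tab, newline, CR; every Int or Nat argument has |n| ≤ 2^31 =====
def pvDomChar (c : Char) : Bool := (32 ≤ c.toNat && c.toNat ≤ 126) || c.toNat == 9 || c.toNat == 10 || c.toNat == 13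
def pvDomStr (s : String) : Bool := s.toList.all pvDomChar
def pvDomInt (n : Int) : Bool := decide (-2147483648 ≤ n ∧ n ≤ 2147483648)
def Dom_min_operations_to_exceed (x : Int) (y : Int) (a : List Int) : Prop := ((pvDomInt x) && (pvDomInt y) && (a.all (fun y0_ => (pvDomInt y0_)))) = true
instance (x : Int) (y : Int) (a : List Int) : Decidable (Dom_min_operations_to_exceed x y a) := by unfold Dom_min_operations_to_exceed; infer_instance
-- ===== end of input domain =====

-- B builds the distinct multipliers once (set + descending sort) and makes one pass,
-- instead of A's repeated whole-list filter each iteration (a different algorithm of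
-- similar measured cost); return values are equal on all inputs
-- (A additionally sorts its list argument in place, a side effect B does not have).


-- ===== PORT A =====
-- A's while loop: while x < y: if not a: return -1; m = a[0]; x *= m;
-- a = [e for e in a if e != m]; operations += 1.  Terminates because the filter
-- removes at least the occurrence a[0] of m, so the list strictly shrinks.
def pvLoopA (y : Int) (operations : Int) (x : Int) (a : List Int) : Int :=
  if x < y then
    match h : a with
    | [] => -1
    | m :: _ => pvLoopA y (operations + 1) (x * m) (a.filter (· ≠ m))
  else operations
termination_by a.length
decreasing_by
  subst h
  simp
  exact le_trans (List.length_filter_le _ _) (by simp)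

def min_operations_to_exceed (x : Int) (y : Int) (a : List Int) : Int :=
  pvLoopA y 0 x (PySem.List.sorted a (fun v => v) true)

-- ===== PORT B =====
-- Source B: ops = 0; for v in sorted(set(a), reverse=True): if x >= y: return ops;
-- x *= v; ops += 1;  then return ops if x >= y else -1.
def pvLoopB (y : Int) (ops : Int) (x : Int) : List Int → Int
  | [] => if x ≥ y then ops else -1
  | v :: vs => if x ≥ y then ops else pvLoopB y (ops + 1) (x * v) vs

def min_operations_to_exceed_alt (x : Int) (y : Int) (a : List Int) : Int :=
  pvLoopB y 0 x (PySem.List.sorted (PySem.Set.ofList a) (fun v => v) true)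

-- ===== PRECONDITION & SPEC =====
def Spec_min_operations_to_exceed (x : Int) (y : Int) (a : List Int) (out : Int) : Prop := out = min_operations_to_exceed_alt x y a
instance (x : Int) (y : Int) (a : List Int) (out : Int) : Decidable (Spec_min_operations_to_exceed x y a out) := by unfold Spec_min_operations_to_exceed; infer_instance

-- ===== CLAIM (what is proved, stated in full; the proofs are below) =====
def Claim_equal_min_operations_to_exceed : Prop := ∀ (x : Int) (y : Int) (a : List Int), Dom_min_operations_to_exceed x y a → Spec_min_operations_to_exceed x y a (min_operations_to_exceed x y a)

-- ===== LEMMAS AND PROOFS =====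

-- `pvDD l`: the list of first occurrences of the distinct values of l, in order
-- (what A's repeated "remove all copies of the head" loop effectively walks through).
def pvDD : List Int → List Int
  | [] => []
  | h :: t => h :: pvDD (t.filter (· ≠ h))
termination_by l => l.length
decreasing_by
  simp only [List.length_unattach]
  exact Nat.lt_succ_of_le (le_trans (List.length_filter_le _ _) (by simp))

theorem pvLoopA_nil (y ops x : Int) :
    pvLoopA y ops x [] = if x < y then -1 else ops := by
  conv_lhs => rw [pvLoopA]

theorem pvLoopA_cons (y ops x m : Int) (t : List Int) :
    pvLoopA y ops x (m :: t)
      = if x < y then pvLoopA y (ops + 1) (x * m) ((m :: t).filter (· ≠ m)) else ops := by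
  conv_lhs => rw [pvLoopA]

theorem pvDD_nil : pvDD [] = [] := by simp [pvDD]

theorem pvDD_cons (h : Int) (t : List Int) :
    pvDD (h :: t) = h :: pvDD (t.filter (· ≠ h)) := by
  conv_lhs => rw [pvDD]

theorem pvDD_mem_aux : ∀ n : Nat, ∀ l : List Int, l.length ≤ n →
    ∀ x : Int, x ∈ pvDD l → x ∈ l := by
  intro n
  induction n with
  | zero =>
    intro l hl
    rw [List.length_eq_zero_iff.1 (Nat.le_zero.1 hl)]
    simp [pvDD_nil]
  | succ n ih =>
    intro l hl x hx
    match l with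
    | [] => simp [pvDD_nil] at hx
    | h :: t =>
      rw [pvDD_cons] at hx
      rcases List.mem_cons.1 hx with rfl | hx
      · exact List.mem_cons_self
      · have hlen : (t.filter (· ≠ h)).length ≤ n :=
          le_trans (List.length_filter_le _ _) (by simpa using hl)
        exact List.mem_cons_of_mem _ (List.mem_of_mem_filter (ih _ hlen x hx))

theorem pvDD_mem {x : Int} {l : List Int} (hx : x ∈ pvDD l) : x ∈ l :=
  pvDD_mem_aux l.length l le_rfl x hx

theorem pvDD_mem_of_mem : ∀ n : Nat, ∀ l : List Int, l.length ≤ n →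
    ∀ x : Int, x ∈ l → x ∈ pvDD l := by
  intro n
  induction n with
  | zero =>
    intro l hl
    rw [List.length_eq_zero_iff.1 (Nat.le_zero.1 hl)]
    simp
  | succ n ih =>
    intro l hl x hx
    match l with
    | [] => simp at hx
    | h :: t =>
      rw [pvDD_cons]
      rcases List.mem_cons.1 hx with rfl | hxt
      · exact List.mem_cons_self
      · by_cases hxh : x = h
        · subst hxh; exact List.mem_cons_self
        · have hlen : (t.filter (· ≠ h)).length ≤ n :=
            le_trans (List.length_filter_le _ _) (by simpa using hl)
          exact List.mem_cons_of_mem _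
            (ih _ hlen x (List.mem_filter.2 ⟨hxt, by simpa using hxh⟩))

theorem pvDD_not_mem_head {h : Int} {t : List Int} : h ∉ pvDD (t.filter (· ≠ h)) := by
  intro hmem
  have := List.of_mem_filter (pvDD_mem hmem)
  simp at this

theorem pvDD_nodup : ∀ n : Nat, ∀ l : List Int, l.length ≤ n → (pvDD l).Nodup := by
  intro n
  induction n with
  | zero =>
    intro l hl
    rw [List.length_eq_zero_iff.1 (Nat.le_zero.1 hl)]
    simp [pvDD_nil]
  | succ n ih =>
    intro l hl
    match l with
    | [] => simp [pvDD_nil]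
    | h :: t =>
      rw [pvDD_cons]
      have hlen : (t.filter (· ≠ h)).length ≤ n :=
        le_trans (List.length_filter_le _ _) (by simpa using hl)
      exact List.nodup_cons.2 ⟨pvDD_not_mem_head, ih _ hlen⟩

theorem pvDD_pairwise_gt : ∀ n : Nat, ∀ l : List Int, l.length ≤ n →
    l.Pairwise (· ≥ ·) → (pvDD l).Pairwise (· > ·) := by
  intro n
  induction n with
  | zero =>
    intro l hl _
    rw [List.length_eq_zero_iff.1 (Nat.le_zero.1 hl)]
    simp [pvDD_nil]
  | succ n ih =>
    intro l hl hp
    match l with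
    | [] => simp [pvDD_nil]
    | h :: t =>
      rw [pvDD_cons]
      rcases List.pairwise_cons.1 hp with ⟨hhd, htl⟩
      have hlen : (t.filter (· ≠ h)).length ≤ n :=
        le_trans (List.length_filter_le _ _) (by simpa using hl)
      refine List.pairwise_cons.2 ⟨?_, ih _ hlen (htl.filter _)⟩
      intro b hb
      have hbmem := pvDD_mem hb
      have hble : h ≥ b := hhd b (List.mem_of_mem_filter hbmem)
      have hbne : ¬ b = h := by simpa using List.of_mem_filter hbmem
      omega

-- Step 1: A's loop on any list equals A's loop on its ordered dedup.
theorem pvLoopA_dedup (y : Int) : ∀ n : Nat, ∀ l : List Int, l.length ≤ n →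
    ∀ ops x : Int, pvLoopA y ops x l = pvLoopA y ops x (pvDD l) := by
  intro n
  induction n with
  | zero =>
    intro l hl ops x
    rw [List.length_eq_zero_iff.1 (Nat.le_zero.1 hl)]
    rw [pvDD_nil]
  | succ n ih =>
    intro l hl ops x
    match l with
    | [] => rw [pvDD_nil]
    | h :: t =>
      rw [pvDD_cons, pvLoopA_cons, pvLoopA_cons]
      by_cases hxy : x < y
      · simp only [hxy, if_true]
        have hht : (h :: t).filter (· ≠ h) = t.filter (· ≠ h) := by
          rw [List.filter_cons]; simp
        have hfilter : (h :: pvDD (t.filter (· ≠ h))).filter (· ≠ h)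
            = pvDD (t.filter (· ≠ h)) := by
          rw [List.filter_cons]
          simp only [ne_eq, not_true_eq_false, decide_false, Bool.false_eq_true, if_false]
          exact List.filter_eq_self.2 fun b hb => by
            simpa using List.of_mem_filter (pvDD_mem hb)
        have hlen : (t.filter (· ≠ h)).length ≤ n :=
          le_trans (List.length_filter_le _ _) (by simpa using hl)
        rw [hht, hfilter, ih _ hlen]
      · simp [hxy]

-- Step 2: on a duplicate-free list, A's loop is B's loop.
theorem pvLoopA_eq_loopB (y : Int) : ∀ l : List Int, l.Nodup → ∀ ops x : Int,
    pvLoopA y ops x l = pvLoopB y ops x l := by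
  intro l
  induction l with
  | nil =>
    intro _ ops x
    rw [pvLoopA_nil, pvLoopB]
    by_cases hxy : x < y
    · simp [hxy, show ¬ x ≥ y by omega]
    · simp [hxy, show x ≥ y by omega]
  | cons h t ih =>
    intro hnd ops x
    rcases List.nodup_cons.1 hnd with ⟨hnot, hndt⟩
    rw [pvLoopA_cons, pvLoopB]
    by_cases hxy : x < y
    · have hge : ¬ x ≥ y := by omega
      simp only [hxy, if_true, hge, if_false]
      have hfe : (h :: t).filter (· ≠ h) = t := by
        rw [List.filter_cons]
        simp only [ne_eq, not_true_eq_false, decide_false, Bool.false_eq_true, if_false]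
        exact List.filter_eq_self.2 fun b hb => by
          simp; rintro rfl; exact hnot hb
      rw [hfe, ih hndt]
    · have hge : x ≥ y := by omega
      simp [hxy, hge]

-- Step 3: the list B sorts is exactly the ordered dedup of the list A sorts.
theorem pvSorted_set_eq_dd (a : List Int) :
    PySem.List.sorted (PySem.Set.ofList a) (fun v => v) true
      = pvDD (PySem.List.sorted a (fun v => v) true) := by
  apply PySem.List.sorted_rev_eq_of_perm_of_pairwise_gt
  · rw [List.perm_ext_iff_of_nodup (pvDD_nodup _ _ le_rfl) (PySem.Set.nodup_ofList a)]
    intro v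
    constructor
    · intro hv
      have hm := pvDD_mem hv
      rw [PySem.List.mem_sorted] at hm
      exact (PySem.Set.mem_ofList a v).2 hm
    · intro hv
      refine pvDD_mem_of_mem _ _ le_rfl v ?_
      rw [PySem.List.mem_sorted]
      exact (PySem.Set.mem_ofList a v).1 hv
  · exact pvDD_pairwise_gt _ _ le_rfl (PySem.List.sorted_pairwise_rev a (fun v => v))

-- ===== VERDICT (by name: the statement is the Claim_ definition above) =====
theorem min_operations_to_exceed_spec : Claim_equal_min_operations_to_exceed := by
  intro x y a _
  unfold Spec_min_operations_to_exceed min_operations_to_exceed min_operations_to_exceed_alt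
  rw [pvSorted_set_eq_dd, pvLoopA_dedup y _ _ le_rfl,
    pvLoopA_eq_loopB _ _ (pvDD_nodup _ _ le_rfl)]
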